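-- pv_equiv track=rewrite | github.com/dorothyap/acsl | 2018-2019/Philip_Dorothy_2.py | longword
-- ===== SOURCE A (Python) =====
-- def longword(userinput) :
--     splits = userinput.split();
--     longestword = ''
--     for i in splits:
--         word = ''.join(ch for ch in i if ch.isalpha())
--         if len(word) > len(longestword) :
--             longestword = word
--     return longestword
-- ===== SOURCE B (Python) =====
-- def longword(userinput):
--     words = [''.join(ch for ch in w if ch.isalpha()) for w in userinput.split()]
--     ranked = sorted(words, key=len, reverse=True)
--     return ranked[0] if ranked else ''
-- ===== Notes on version B (the rewrite author's own statement) =====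
-- stated objective: alternative
-- what changed: Replaces the single-pass max-tracking scan with building the full list of alphabetic-filtered words and picking the head of a stable length-descending sort (same first-occurrence tie-break).
import Mathlib
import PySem

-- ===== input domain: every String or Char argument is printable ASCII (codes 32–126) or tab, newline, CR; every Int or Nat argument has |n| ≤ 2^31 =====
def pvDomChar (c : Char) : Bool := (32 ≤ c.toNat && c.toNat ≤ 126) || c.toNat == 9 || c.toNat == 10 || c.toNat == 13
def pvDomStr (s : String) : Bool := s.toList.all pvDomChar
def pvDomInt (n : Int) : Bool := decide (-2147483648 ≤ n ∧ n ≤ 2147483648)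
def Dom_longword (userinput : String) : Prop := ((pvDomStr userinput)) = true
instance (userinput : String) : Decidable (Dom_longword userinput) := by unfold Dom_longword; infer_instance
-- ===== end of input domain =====

-- B replaces A's single-pass max-tracking scan by a sort-then-pick: build all filtered
-- words, stable-sort by length descending, return the head (alternative decomposition).


-- ===== PORT A =====
-- ''.join(ch for ch in i if ch.isalpha()) is ported as String.ofList of the filtered
-- character list (exact: join with empty separator concatenates the characters).
def longword (userinput : String) : String :=
  let splits := PySem.Str.split₀ userinput
  splits.foldl (fun longestword i =>
    let word := String.ofList (i.toList.filter PySem.Chars.isalpha)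
    if PySem.Str.len word > PySem.Str.len longestword then word else longestword) ""

-- ===== PORT B =====
def longword_alt (userinput : String) : String :=
  let words := (PySem.Str.split₀ userinput).map
    (fun w => String.ofList (w.toList.filter PySem.Chars.isalpha))
  let ranked := PySem.List.sorted words (fun w => PySem.Str.len w) true
  ranked.headD ""

-- ===== PRECONDITION & SPEC =====
def Spec_longword (userinput : String) (out : String) : Prop := out = longword_alt userinput
instance (userinput : String) (out : String) : Decidable (Spec_longword userinput out) := by unfold Spec_longword; infer_instance

-- ===== CLAIM (what is proved, stated in full; the proofs are below) =====
def Claim_equal_longword : Prop := ∀ (userinput : String), Dom_longword userinput → Spec_longword userinput (longword userinput)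

-- ===== LEMMAS AND PROOFS =====

theorem pv_insertBy_nil {α : Type} (before : α → α → Bool) (x : α) :
    PySem.List.insertBy before x [] = [x] := rfl

theorem pv_insertBy_cons {α : Type} (before : α → α → Bool) (x y : α) (ys : List α) :
    PySem.List.insertBy before x (y :: ys) =
      if before x y then x :: y :: ys else y :: PySem.List.insertBy before x ys := rfl

-- The scan that keeps the first strictly-longer word equals the head of the stable
-- length-descending sort, provided every length-0 element is literally "".
theorem pv_scan_eq_sorted_head (ws : List String)
    (H : ∀ w ∈ ws, w.toList.length = 0 → w = "") :
    ws.foldl (fun best w => if PySem.Str.len w > PySem.Str.len best then w else best) "" =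
      (PySem.List.sorted ws (fun w => PySem.Str.len w) true).headD "" := by
  induction ws using List.reverseRecOn with
  | nil => rfl
  | append_singleton ws x ih =>
    have H' : ∀ w ∈ ws, w.toList.length = 0 → w = "" := fun w hw => H w (by simp [hw])
    have Hx : x.toList.length = 0 → x = "" := H x (by simp)
    have hstep : PySem.List.sorted (ws ++ [x]) (fun w => PySem.Str.len w) true =
        PySem.List.insertBy (fun a b => decide (PySem.Str.len b < PySem.Str.len a)) x
          (PySem.List.sorted ws (fun w => PySem.Str.len w) true) := by
      rw [PySem.List.sorted_rev_eq_foldl_insertBy, PySem.List.sorted_rev_eq_foldl_insertBy,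
          List.foldl_append, List.foldl_cons, List.foldl_nil]
    rw [List.foldl_append, ih H', hstep]
    cases hs : PySem.List.sorted ws (fun w => PySem.Str.len w) true with
    | nil =>
      have hws : ws = [] := (PySem.List.sorted_eq_nil_iff _ _ _).mp hs
      simp only [List.foldl_cons, List.foldl_nil, pv_insertBy_nil, List.headD_cons,
        List.headD_nil]
      by_cases h0 : x.toList.length = 0
      · rw [Hx h0]; simp
      · have hpos : PySem.Str.len x > PySem.Str.len "" := by
          have h1 : "".toList.length = 0 := rfl
          simp only [PySem.Str.len_eq]
          omega
        rw [if_pos hpos]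
    | cons h t =>
      simp only [List.foldl_cons, List.foldl_nil, pv_insertBy_cons, List.headD_cons,
        gt_iff_lt, decide_eq_true_eq]
      split_ifs with hc <;> simp

-- ===== VERDICT (by name: the statement is the Claim_ definition above) =====
theorem longword_spec : Claim_equal_longword := by
  intro u _
  unfold Spec_longword longword longword_alt
  dsimp only
  have hmap := List.foldl_map
    (f := fun w : String => String.ofList (w.toList.filter PySem.Chars.isalpha))
    (g := fun (best w : String) => if PySem.Str.len w > PySem.Str.len best then w else best)
    (l := PySem.Str.split₀ u) (init := "")
  rw [← hmap]
  exact pv_scan_eq_sorted_head _ (by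
    intro w hw h0
    rcases List.mem_map.mp hw with ⟨v, -, rfl⟩
    have h0' : (v.toList.filter PySem.Chars.isalpha).length = 0 := by
      simpa only [String.toList_ofList] using h0
    rw [List.length_eq_zero_iff.mp h0'])
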